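-- pv_equiv track=rewrite | github.com/five-over-four/smallencodinggui | bin2ascii_gui.py | mash2string
-- ===== SOURCE A (Python) =====
-- def mash2string(rows: list):
--     output = ""
--     rows = "".join(rows).strip()
--     rows = "".join(rows.split(" ")) # now it's just "01101001001010010...010101".
--     for index, chara in enumerate(rows): # group in eights.
--         output += chara
--         output += " " if (index + 1) % 8 == 0 else ""
--     return output.strip()
-- ===== SOURCE B (Python) =====
-- def mash2string(rows: list):
--     s = "".join("".join(rows).strip().split(" "))
--     chunks = []
--     i = 0
--     while i < len(s):
--         chunks.append(s[i:i+8])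
--         i += 8
--     return " ".join(chunks)
-- ===== Notes on version B (the rewrite author's own statement) =====
-- stated objective: idiomatic
-- what changed: B keeps the same cleaning pipeline but collects 8-character slices in a chunk loop and joins them with spaces, instead of A's char-by-char loop with a modulo counter, conditional space insertion and a final strip.
import Mathlib
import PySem

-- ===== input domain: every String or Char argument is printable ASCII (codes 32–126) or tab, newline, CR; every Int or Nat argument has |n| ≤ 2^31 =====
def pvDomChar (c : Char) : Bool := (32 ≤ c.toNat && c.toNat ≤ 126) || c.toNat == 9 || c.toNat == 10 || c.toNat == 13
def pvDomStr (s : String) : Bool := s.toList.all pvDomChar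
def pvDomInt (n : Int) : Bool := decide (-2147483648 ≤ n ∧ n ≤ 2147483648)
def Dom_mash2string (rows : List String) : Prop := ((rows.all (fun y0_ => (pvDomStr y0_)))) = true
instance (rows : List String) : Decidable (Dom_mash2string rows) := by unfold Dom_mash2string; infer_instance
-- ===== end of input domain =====

-- B keeps A's cleaning pipeline but collects 8-character slices of the cleaned bit string in a
-- chunk loop and joins them with spaces, instead of A's char-by-char loop with a modulo counter,
-- conditional space insertion and a final strip (objective: idiomatic; measured faster by a constant factor).

-- ===== PORT A =====
def mash2string (rows : List String) : String :=
  let r1 := PySem.Chars.strip (PySem.Chars.join [] (rows.map String.toList))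
  let r2 := PySem.Chars.join [] (PySem.Chars.splitOn r1 [' '])
  let output := (PySem.List.enumerate r2 0).foldl
      (fun out ic => (out ++ [ic.2]) ++ (if PySem.Int.mod (ic.1 + 1) 8 = 0 then [' '] else [])) []
  String.ofList (PySem.Chars.strip output)

-- ===== PORT B =====
-- the while loop of Source B: append s[i:i+8], advance i by 8
def altChunksIdx (s : List Char) (i : Nat) : List (List Char) :=
  if i < s.length then
    PySem.List.slice s (some (i:Int)) (some ((i:Int)+8)) :: altChunksIdx s (i+8)
  else []
termination_by s.length - i

def mash2string_alt (rows : List String) : String :=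
  let s := PySem.Chars.join [] (PySem.Chars.splitOn
      (PySem.Chars.strip (PySem.Chars.join [] (rows.map String.toList))) [' '])
  String.ofList (PySem.Chars.join [' '] (altChunksIdx s 0))

-- ===== PRECONDITION & SPEC =====
def Spec_mash2string (rows : List String) (out : String) : Prop := out = mash2string_alt rows
instance (rows : List String) (out : String) : Decidable (Spec_mash2string rows out) := by unfold Spec_mash2string; infer_instance

-- ===== CLAIM (what is proved, stated in full; the proofs are below) =====
def Claim_equal_mash2string : Prop := ∀ (rows : List String), Dom_mash2string rows → Spec_mash2string rows (mash2string rows)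

-- ===== LEMMAS AND PROOFS =====

-- A's loop as a pure function of the remaining characters and the Nat position
def gA : List Char → Nat → List Char
  | [], _ => []
  | c :: t, k => ([c] ++ (if (k + 1) % 8 = 0 then [' '] else [])) ++ gA t (k + 1)


-- proof-side view of B's chunk loop: structural recursion on the dropped list
def altChunks (s : List Char) : List (List Char) :=
  if s = [] then []
  else s.take 8 :: altChunks (s.drop 8)
termination_by s.length
decreasing_by
  have : s.length ≠ 0 := by simpa [List.length_eq_zero_iff] using (by assumption : ¬ s = [])
  simp; omega

lemma altChunks_nil : altChunks [] = [] := by rw [altChunks]; simp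

lemma altChunks_cons (s : List Char) (h : s ≠ []) :
    altChunks s = s.take 8 :: altChunks (s.drop 8) := by
  rw [altChunks, if_neg h]

lemma altChunksIdx_eq : ∀ (n : Nat) (s : List Char) (i : Nat), s.length - i ≤ n →
    altChunksIdx s i = altChunks (s.drop i) := by
  intro n
  induction n with
  | zero =>
      intro s i h
      rw [altChunksIdx, if_neg (by omega)]
      rw [List.drop_eq_nil_iff.mpr (by omega), altChunks_nil]
  | succ n ih =>
      intro s i h
      by_cases hi : i < s.length
      · rw [altChunksIdx, if_pos hi,
            show ((i:Int) + 8) = (((i+8 : Nat)):Int) by push_cast; ring,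
            PySem.List.slice_natCast,
            show i + 8 - i = 8 by omega,
            ih s (i+8) (by omega),
            altChunks_cons (s.drop i) (by intro hx; have := List.drop_eq_nil_iff.mp hx; omega)]
        rw [List.drop_drop]
      · rw [altChunksIdx, if_neg hi,
            List.drop_eq_nil_iff.mpr (by omega), altChunks_nil]

lemma join_nil_eq_flatten (ps : List (List Char)) : PySem.Chars.join [] ps = ps.flatten := by
  induction ps with
  | nil => simp [PySem.Chars.join_nil]
  | cons p rest ih =>
      cases rest with
      | nil => simp [PySem.Chars.join_singleton]
      | cons q t => rw [PySem.Chars.join_cons_cons]; simp [ih]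

lemma go_spec (fuel : Nat) (l cur : List Char) (acc2 : List (List Char)) :
    l.length < fuel →
    PySem.Chars.join [] (PySem.Chars.splitOn.go [' '] fuel l cur acc2) =
      acc2.reverse.flatten ++ cur.reverse ++ l.filter (fun c => c != ' ') := by
  induction fuel generalizing l cur acc2 with
  | zero => intro h; omega
  | succ fuel ih =>
      intro h
      cases l with
      | nil =>
          rw [PySem.Chars.splitOn.go]
          · rw [join_nil_eq_flatten]; simp
          · omega
      | cons c rest =>
          rw [PySem.Chars.splitOn.go]
          by_cases hc : c = ' '
          · subst hc
            simp only [List.isPrefixOf, BEq.rfl, Bool.true_and, if_pos]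
            rw [ih _ _ _ (by simpa using Nat.lt_of_succ_lt_succ h)]
            simp
          · have hp : [' '].isPrefixOf (c :: rest) = false := by
              simp [List.isPrefixOf]; exact fun hcc => (hc hcc.symm).elim
            rw [if_neg (by simp [hp])]
            rw [ih _ _ _ (by simpa using Nat.lt_of_succ_lt_succ h)]
            simp [hc]

lemma clean_eq_filter (x : List Char) :
    PySem.Chars.join [] (PySem.Chars.splitOn x [' ']) = x.filter (fun c => c != ' ') := by
  rw [show PySem.Chars.splitOn x [' '] = PySem.Chars.splitOn.go [' '] (x.length + 1) x [] [] from rfl,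
      go_spec (x.length + 1) x [] [] (by omega)]
  simp

lemma foldA_eq_gA (l : List Char) (s : Nat) (acc : List Char) :
    (PySem.List.enumerate l (s : Int)).foldl
      (fun out ic => (out ++ [ic.2]) ++ (if PySem.Int.mod (ic.1 + 1) 8 = 0 then [' '] else [])) acc
      = acc ++ gA l s := by
  induction l generalizing s acc with
  | nil => simp [PySem.List.enumerate_nil, gA]
  | cons c t ih =>
      rw [PySem.List.enumerate_cons, List.foldl_cons]
      have h1 : ((s:Int) + 1) = ((s+1 : Nat) : Int) := by push_cast; ring
      have h2 : PySem.Int.mod ((s:Int) + 1) 8 = (((s+1) % 8 : Nat) : Int) := by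
        rw [h1, show ((8:Int)) = ((8:Nat):Int) by norm_num, PySem.Int.mod_natCast]
      rw [h1] at *
      rw [ih]
      simp only [gA, h2]
      by_cases hm : (s+1) % 8 = 0
      · simp [hm]
      · simp [hm]; omega

lemma gA_append (a b : List Char) (k : Nat) : gA (a ++ b) k = gA a k ++ gA b (k + a.length) := by
  induction a generalizing k with
  | nil => simp [gA]
  | cons c t ih => simp [gA, ih, Nat.add_assoc, Nat.add_comm 1]

lemma gA_shift (l : List Char) (k : Nat) : gA l (k + 8) = gA l k := by
  induction l generalizing k with
  | nil => rfl
  | cons c t ih =>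
      have : (k + 8 + 1) % 8 = (k + 1) % 8 := by omega
      simp only [gA, this, show k + 8 + 1 = (k+1) + 8 by omega, ih]

lemma gA_small (l : List Char) (k : Nat) (h : k + l.length < 8) : gA l k = l := by
  induction l generalizing k with
  | nil => rfl
  | cons c t ih =>
      simp at h
      have : (k + 1) % 8 ≠ 0 := by omega
      simp only [gA, if_neg this]
      simp [ih (k+1) (by omega)]

lemma gA_full (l : List Char) (k : Nat) (h0 : l ≠ []) (h : k + l.length = 8) : gA l k = l ++ [' '] := by
  induction l generalizing k with
  | nil => exact absurd rfl h0
  | cons c t ih =>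
      cases t with
      | nil =>
          have hk : k = 7 := by simp at h; omega
          subst hk; simp [gA]
      | cons d u =>
          have hlt : (k + 1) % 8 ≠ 0 := by simp at h; omega
          have ihh := ih (k+1) (by simp) (by simp at h ⊢; omega)
          rw [show gA (c::d::u) k = ([c] ++ (if (k+1)%8=0 then [' '] else [])) ++ gA (d::u) (k+1) from rfl,
              if_neg hlt, ihh]
          simp

lemma headJ (l : List Char) (h : l ≠ []) :
    (PySem.Chars.join [' '] (altChunks l)).head? = l.head? := by
  rw [altChunks_cons l h]
  by_cases hd : l.drop 8 = []
  · rw [hd, altChunks_nil, PySem.Chars.join_singleton]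
    cases l with
    | nil => simp at h
    | cons c t => simp [List.take_succ_cons]
  · have : altChunks (l.drop 8) ≠ [] := by
      rw [altChunks_cons _ hd]; simp
    obtain ⟨d, rest, hrest⟩ : ∃ d rest, altChunks (l.drop 8) = d :: rest := by
      cases hx : altChunks (l.drop 8) with
      | nil => exact absurd hx this
      | cons d rest => exact ⟨d, rest, rfl⟩
    rw [hrest, PySem.Chars.join_cons_cons]
    cases l with
    | nil => simp at h
    | cons c t => simp [List.take_succ_cons]

lemma getLastJ : ∀ (n : Nat) (l : List Char), l.length ≤ n → l ≠ [] →
    (PySem.Chars.join [' '] (altChunks l)).getLast? = l.getLast? := by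
  intro n
  induction n with
  | zero => intro l hl h; interval_cases hx : l.length; · simp [List.length_eq_zero_iff] at hx; exact absurd hx h
  | succ n ih =>
      intro l hl h
      rw [altChunks_cons l h]
      by_cases hd : l.drop 8 = []
      · rw [hd, altChunks_nil, PySem.Chars.join_singleton]
        have : l.take 8 = l := List.take_of_length_le (by
          have := List.drop_eq_nil_iff.mp hd; omega)
        rw [this]
      · obtain ⟨d, rest, hrest⟩ : ∃ d rest, altChunks (l.drop 8) = d :: rest := by
          cases hx : altChunks (l.drop 8) with
          | nil => rw [altChunks_cons _ hd] at hx; simp at hx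
          | cons d rest => exact ⟨d, rest, rfl⟩
        rw [hrest, PySem.Chars.join_cons_cons, ← hrest]
        have hlen : (l.drop 8).length ≤ n := by
          have h1 : l.length ≠ 0 := by simpa [List.length_eq_zero_iff] using h
          simp; omega
        have hJ := ih (l.drop 8) hlen hd
        have hJne : PySem.Chars.join [' '] (altChunks (l.drop 8)) ≠ [] := by
          intro hx
          rw [hx] at hJ
          have := List.getLast?_isSome.mpr hd
          rw [← hJ] at this; simp at this
        have h1 : ([' '] ++ PySem.Chars.join [' '] (altChunks (List.drop 8 l))) ≠ [] := by simp
        rw [List.append_assoc, List.getLast?_append_of_ne_nil _ h1,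
            List.getLast?_append_of_ne_nil _ hJne, hJ]
        conv_rhs => rw [← List.take_append_drop 8 l]
        exact (List.getLast?_append_of_ne_nil _ hd).symm

lemma gA_chunks : ∀ (n : Nat) (l : List Char), l.length ≤ n →
    gA l 0 = PySem.Chars.join [' '] (altChunks l) ++
      (if l = [] then [] else if l.length % 8 = 0 then [' '] else []) := by
  intro n
  induction n with
  | zero =>
      intro l hl
      have : l = [] := List.length_eq_zero_iff.mp (by omega)
      subst this; simp [altChunks_nil, PySem.Chars.join_nil, gA]
  | succ n ih =>
      intro l hl
      by_cases h : l = []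
      · subst h; simp [altChunks_nil, PySem.Chars.join_nil, gA]
      rw [if_neg h, altChunks_cons l h]
      by_cases h8 : l.length < 8
      · have hd : l.drop 8 = [] := List.drop_eq_nil_iff.mpr (by omega)
        rw [hd, altChunks_nil, PySem.Chars.join_singleton,
            List.take_of_length_le (by omega), gA_small l 0 (by omega)]
        have : l.length % 8 ≠ 0 := by
          have : l.length ≠ 0 := by simpa [List.length_eq_zero_iff] using h
          omega
        simp [this]
      by_cases heq : l.length = 8
      · have hd : l.drop 8 = [] := List.drop_eq_nil_iff.mpr (by omega)
        rw [hd, altChunks_nil, PySem.Chars.join_singleton,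
            List.take_of_length_le (by omega), gA_full l 0 h (by omega)]
        simp [heq]
      · -- length > 8
        have hgt : 8 < l.length := by omega
        have hd : l.drop 8 ≠ [] := by
          intro hx; have := List.drop_eq_nil_iff.mp hx; omega
        obtain ⟨d, rest, hrest⟩ : ∃ d rest, altChunks (l.drop 8) = d :: rest := by
          cases hx : altChunks (l.drop 8) with
          | nil => rw [altChunks_cons _ hd] at hx; simp at hx
          | cons d rest => exact ⟨d, rest, rfl⟩
        rw [hrest, PySem.Chars.join_cons_cons, ← hrest]
        have htake : (l.take 8).length = 8 := by simp; omega
        conv_lhs => rw [← List.take_append_drop 8 l]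
        rw [gA_append, htake, gA_full (l.take 8) 0 (by simp [List.take_eq_nil_iff]; omega) (by omega),
            show (0:Nat) + 8 = 0 + 8 from rfl, gA_shift (l.drop 8) 0,
            ih (l.drop 8) (by simp; omega), if_neg hd]
        have hmod : (l.drop 8).length % 8 = l.length % 8 := by simp; omega
        rw [hmod]
        simp [List.append_assoc]

lemma rstrip_append_space (x : List Char) :
    PySem.Chars.rstrip (x ++ [' ']) = PySem.Chars.rstrip x := by
  simp [PySem.Chars.rstrip, show PySem.Chars.isspace ' ' = true from rfl]

lemma strip_append_space (x : List Char) :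
    PySem.Chars.strip (x ++ [' ']) = PySem.Chars.strip x := by
  show PySem.Chars.rstrip (PySem.Chars.lstrip (x ++ [' '])) = _
  rw [show PySem.Chars.lstrip (x ++ [' ']) = List.dropWhile PySem.Chars.isspace (x ++ [' ']) from rfl,
      List.dropWhile_append]
  by_cases he : (List.dropWhile PySem.Chars.isspace x).isEmpty
  · rw [if_pos he]
    have hx : List.dropWhile PySem.Chars.isspace x = [] := by simpa [List.isEmpty_iff] using he
    show _ = PySem.Chars.rstrip (PySem.Chars.lstrip x)
    rw [show PySem.Chars.lstrip x = List.dropWhile PySem.Chars.isspace x from rfl, hx]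
    simp [show PySem.Chars.isspace ' ' = true from rfl]
  · rw [if_neg he]
    exact rstrip_append_space _

lemma ws_head (w : List Char) (a : Char) (t : List Char)
    (h : List.dropWhile PySem.Chars.isspace w = a :: t) : PySem.Chars.isspace a = false := by
  induction w with
  | nil => simp at h
  | cons b u ih =>
      by_cases hb : PySem.Chars.isspace b
      · rw [List.dropWhile_cons, if_pos hb] at h; exact ih h
      · rw [List.dropWhile_cons, if_neg hb] at h
        cases h; simpa using hb

lemma strip_eq_self (l : List Char)
    (hh : ∀ c, l.head? = some c → PySem.Chars.isspace c = false)
    (hl : ∀ c, l.getLast? = some c → PySem.Chars.isspace c = false) :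
    PySem.Chars.strip l = l := by
  show PySem.Chars.rstrip (PySem.Chars.lstrip l) = l
  have h1 : PySem.Chars.lstrip l = l := by
    cases l with
    | nil => rfl
    | cons a t =>
        show List.dropWhile _ _ = _
        rw [List.dropWhile_cons, if_neg (by simp [hh a rfl])]
  rw [h1]
  show (List.dropWhile PySem.Chars.isspace l.reverse).reverse = l
  cases hr : l.reverse with
  | nil => simp [List.reverse_eq_nil_iff.mp hr]
  | cons a t =>
      have ha : PySem.Chars.isspace a = false := by
        apply hl
        rw [← List.head?_reverse, hr]; rfl
      rw [List.dropWhile_cons, if_neg (by simp [ha]), ← hr, List.reverse_reverse]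

lemma head_filter_dropWhile (w : List Char) (c : Char)
    (h : (List.filter (fun c => c != ' ') (List.dropWhile PySem.Chars.isspace w)).head? = some c) :
    PySem.Chars.isspace c = false := by
  induction w with
  | nil => simp at h
  | cons b u ih =>
      by_cases hb : PySem.Chars.isspace b
      · rw [List.dropWhile_cons, if_pos hb] at h; exact ih h
      · rw [List.dropWhile_cons, if_neg hb] at h
        have hbs : b ≠ ' ' := by
          intro hx; subst hx; exact hb rfl
        rw [List.filter_cons, if_pos (by simpa using hbs)] at h
        simp at h
        subst h; simpa using hb

lemma head_filter_strip (w : List Char) (c : Char)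
    (h : (List.filter (fun c => c != ' ') (PySem.Chars.strip w)).head? = some c) :
    PySem.Chars.isspace c = false := by
  have hrs : PySem.Chars.strip w = PySem.Chars.rstrip (PySem.Chars.lstrip w) := rfl
  rw [hrs] at h
  have hpre : PySem.Chars.rstrip (PySem.Chars.lstrip w) <+: PySem.Chars.lstrip w := by
    have hs : List.dropWhile PySem.Chars.isspace (PySem.Chars.lstrip w).reverse
        <:+ (PySem.Chars.lstrip w).reverse := List.dropWhile_suffix _
    have h2 := List.reverse_prefix.mpr hs
    rw [List.reverse_reverse] at h2
    exact h2
  cases hr : PySem.Chars.rstrip (PySem.Chars.lstrip w) with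
  | nil => rw [hr] at h; simp at h
  | cons a t =>
      rw [hr] at h hpre
      obtain ⟨q, hq⟩ := hpre
      have hzdef : List.dropWhile PySem.Chars.isspace w = a :: (t ++ q) := by
        rw [show List.dropWhile PySem.Chars.isspace w = PySem.Chars.lstrip w from rfl, ← hq]
        simp
      have ha : PySem.Chars.isspace a = false := ws_head w a (t ++ q) hzdef
      have has : a ≠ ' ' := by intro hx; subst hx; exact absurd ha (by simp; rfl)
      rw [List.filter_cons, if_pos (by simpa using has)] at h
      simp at h; subst h; exact ha

lemma getLast_filter_strip (w : List Char) (c : Char)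
    (h : (List.filter (fun c => c != ' ') (PySem.Chars.strip w)).getLast? = some c) :
    PySem.Chars.isspace c = false := by
  have key : (List.filter (fun c => c != ' ') (PySem.Chars.strip w)).getLast?
      = (List.filter (fun c => c != ' ') (List.dropWhile PySem.Chars.isspace (PySem.Chars.lstrip w).reverse)).head? := by
    rw [← List.head?_reverse, ← List.filter_reverse]
    rw [show PySem.Chars.strip w = (List.dropWhile PySem.Chars.isspace (PySem.Chars.lstrip w).reverse).reverse from rfl,
        List.reverse_reverse]
  rw [key] at h
  exact head_filter_dropWhile _ c h

-- ===== VERDICT (by name: the statement is the Claim_ definition above) =====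
theorem mash2string_spec : Claim_equal_mash2string := by
  intro rows _
  simp only [Spec_mash2string, mash2string, mash2string_alt]
  set E := PySem.Chars.join [] (PySem.Chars.splitOn
      (PySem.Chars.strip (PySem.Chars.join [] (rows.map String.toList))) [' ']) with hEdef
  congr 1
  have hfold := foldA_eq_gA E 0 []
  simp only [Nat.cast_zero] at hfold
  rw [hfold, List.nil_append, gA_chunks E.length E le_rfl,
      altChunksIdx_eq E.length E 0 (by omega), List.drop_zero]
  by_cases hE : E = []
  · rw [if_pos hE, hE, altChunks_nil, PySem.Chars.join_nil, List.append_nil]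
    rfl
  · have hfil : E = List.filter (fun c => c != ' ')
        (PySem.Chars.strip (PySem.Chars.join [] (rows.map String.toList))) := by
      rw [hEdef, clean_eq_filter]
    have hh : ∀ c, (PySem.Chars.join [' '] (altChunks E)).head? = some c →
        PySem.Chars.isspace c = false := by
      intro c hc
      rw [headJ E hE, hfil] at hc
      exact head_filter_strip _ c hc
    have hl : ∀ c, (PySem.Chars.join [' '] (altChunks E)).getLast? = some c →
        PySem.Chars.isspace c = false := by
      intro c hc
      rw [getLastJ E.length E le_rfl hE, hfil] at hc
      exact getLast_filter_strip _ c hc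
    rw [if_neg hE]
    by_cases hm : E.length % 8 = 0
    · rw [if_pos hm, strip_append_space, strip_eq_self _ hh hl]
    · rw [if_neg hm, List.append_nil, strip_eq_self _ hh hl]
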